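-- pv_equiv track=rewrite | github.com/DevOpsMadDog/Fixops | fixops-blended-enterprise/src/services/business_context_processor.py | _analyze_exploitation
-- ===== SOURCE A (Python) =====
-- from typing import Dict, Any, Optional, List
--
-- def _analyze_exploitation(threats: List[Dict]) -> str:
--     """Analyze OTM threats to determine exploitation level"""
--     if not threats:
--         return "none"
--
--     # Check for active exploitation indicators
--     active_threats = [t for t in threats if t.get("status", "").lower() in ["active", "exploited"]]
--     if active_threats:
--         return "active"
--
--     # Check for PoC threats
--     poc_threats = [t for t in threats if "poc" in t.get("description", "").lower()]
--     if poc_threats: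
--         return "poc"
--
--     return "none"
-- ===== SOURCE B (Python) =====
-- from typing import Dict, List
--
-- def _analyze_exploitation(threats: List[Dict]) -> str:
--     """Single pass: return 'active' as soon as one is seen; remember PoC hits."""
--     saw_poc = False
--     for t in threats:
--         if t.get("status", "").lower() in ("active", "exploited"):
--             return "active"
--         if "poc" in t.get("description", "").lower():
--             saw_poc = True
--     return "poc" if saw_poc else "none"
-- ===== Notes on version B (the rewrite author's own statement) =====
-- stated objective: simpler
-- what changed: Two filter passes (build active_threats, then poc_threats) replaced by one loop that returns 'active' on the first active/exploited threat and keeps a saw_poc flag; the empty-list guard disappears since the loop falls through to 'none'.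
import Mathlib
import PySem

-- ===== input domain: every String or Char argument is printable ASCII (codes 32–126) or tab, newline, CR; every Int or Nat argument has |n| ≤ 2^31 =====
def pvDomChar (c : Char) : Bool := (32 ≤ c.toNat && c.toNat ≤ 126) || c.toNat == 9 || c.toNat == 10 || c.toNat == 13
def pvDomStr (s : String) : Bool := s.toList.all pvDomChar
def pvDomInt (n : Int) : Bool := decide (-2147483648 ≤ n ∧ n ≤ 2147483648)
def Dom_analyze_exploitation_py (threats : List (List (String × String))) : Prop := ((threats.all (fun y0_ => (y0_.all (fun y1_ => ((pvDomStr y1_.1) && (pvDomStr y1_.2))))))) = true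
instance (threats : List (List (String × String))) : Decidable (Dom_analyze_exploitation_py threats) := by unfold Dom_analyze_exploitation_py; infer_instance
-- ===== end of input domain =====

-- B replaces A's two filter passes by one loop with an early 'active' return and a saw_poc flag (objective: simpler).

-- ===== PORT A =====
-- t.get(k, "") on the association list (first match, Python dict semantics)
def pvGetS (t : List (String × String)) (k : String) : String :=
  (PySem.Dict.mk t).getD k ""

-- t.get("status","").lower() in ["active","exploited"]
def pvActive (t : List (String × String)) : Bool :=
  ["active", "exploited"].contains (PySem.Str.lower (pvGetS t "status"))

-- "poc" in t.get("description","").lower()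
def pvPoc (t : List (String × String)) : Bool :=
  PySem.Str.isIn "poc" (PySem.Str.lower (pvGetS t "description"))

def analyze_exploitation_py (threats : List (List (String × String))) : String :=
  if threats = [] then "none"
  else
    let active_threats := threats.filter pvActive
    if active_threats ≠ [] then "active"
    else
      let poc_threats := threats.filter pvPoc
      if poc_threats ≠ [] then "poc"
      else "none"

-- ===== PORT B =====
-- the for-loop: early return on an active threat, carrying the saw_poc flag
def pvAltLoop : List (List (String × String)) → Bool → String
  | [], sawPoc => if sawPoc then "poc" else "none"
  | t :: rest, sawPoc =>
    if pvActive t then "active"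
    else pvAltLoop rest (sawPoc || pvPoc t)

def analyze_exploitation_py_alt (threats : List (List (String × String))) : String :=
  pvAltLoop threats false

-- ===== PRECONDITION & SPEC =====
def Spec_analyze_exploitation_py (threats : List (List (String × String))) (out : String) : Prop := out = analyze_exploitation_py_alt threats
instance (threats : List (List (String × String))) (out : String) : Decidable (Spec_analyze_exploitation_py threats out) := by unfold Spec_analyze_exploitation_py; infer_instance

-- ===== CLAIM (what is proved, stated in full; the proofs are below) =====
def Claim_equal_analyze_exploitation_py : Prop := ∀ (threats : List (List (String × String))), Dom_analyze_exploitation_py threats → Spec_analyze_exploitation_py threats (analyze_exploitation_py threats)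

-- ===== LEMMAS AND PROOFS =====
-- characterisation of B's loop
theorem pvAltLoop_eq (ts : List (List (String × String))) (b : Bool) :
    pvAltLoop ts b =
      if ts.any pvActive then "active"
      else if b || ts.any pvPoc then "poc" else "none" := by
  induction ts generalizing b with
  | nil => simp [pvAltLoop]
  | cons t rest ih =>
    simp only [pvAltLoop, List.any_cons]
    by_cases h : pvActive t
    · simp [h]
    · simp [h, ih, Bool.or_assoc]

-- ===== VERDICT (by name: the statement is the Claim_ definition above) =====
theorem analyze_exploitation_py_spec : Claim_equal_analyze_exploitation_py := by
  intro threats _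
  unfold Spec_analyze_exploitation_py analyze_exploitation_py analyze_exploitation_py_alt
  rw [pvAltLoop_eq]
  have ha : (threats.filter pvActive ≠ []) = (threats.any pvActive = true) := by
    simp [List.filter_eq_nil_iff, List.any_eq_true]
  have hp : (threats.filter pvPoc ≠ []) = (threats.any pvPoc = true) := by
    simp [List.filter_eq_nil_iff, List.any_eq_true]
  rcases threats with _ | ⟨t, rest⟩
  · simp
  · simp only [reduceCtorEq, if_false, ha, hp, Bool.false_or]
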